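-- pv_equiv track=rewrite | github.com/vivekpapnai/Python-DSA-Questions | Array/Form a Triangle.py | possibleToMakeTriangle
-- ===== SOURCE A (Python) =====
-- def possibleToMakeTriangle(arr):
--
--     arr = sorted(arr)
--     for i in range(len(arr)-2):
--         a = arr[i]
--         b = arr[i+1]
--         c = arr[i+2]
--         if a + b > c and a + c > b and b + c > a:
--             return True
--     return False
-- ===== SOURCE B (Python) =====
-- def possibleToMakeTriangle(arr):
--     n = len(arr)
--     for i in range(n):
--         for j in range(i + 1, n):
--             for k in range(j + 1, n):
--                 a, b, c = arr[i], arr[j], arr[k]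
--                 if a + b > c and a + c > b and b + c > a:
--                     return True
--     return False
-- ===== Notes on version B (the rewrite author's own statement) =====
-- stated objective: alternative
-- what changed: B drops the sort entirely and brute-force searches all index triples i<j<k, testing the three triangle inequalities directly; equivalent because a valid triple exists iff a consecutive triple of the sorted list is valid.
import Mathlib
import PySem

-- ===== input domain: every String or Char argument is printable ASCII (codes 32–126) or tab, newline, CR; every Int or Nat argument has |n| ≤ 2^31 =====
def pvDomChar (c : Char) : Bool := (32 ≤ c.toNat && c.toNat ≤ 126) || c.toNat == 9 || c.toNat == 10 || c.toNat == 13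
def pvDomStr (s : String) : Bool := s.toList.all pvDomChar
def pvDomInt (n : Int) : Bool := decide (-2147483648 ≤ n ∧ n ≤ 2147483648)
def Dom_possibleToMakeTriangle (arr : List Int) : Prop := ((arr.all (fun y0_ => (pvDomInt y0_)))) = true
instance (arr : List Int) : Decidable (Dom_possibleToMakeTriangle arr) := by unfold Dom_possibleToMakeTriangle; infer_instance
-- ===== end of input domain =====

-- B replaces A's sort-then-scan-adjacent-triples with a brute-force search over all
-- index triples i<j<k, testing the three triangle inequalities directly (objective: alternative).

-- ===== PORT A =====
-- A: sort arr, then for i in range(len(arr)-2) test the consecutive triple; early return True = any.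
def possibleToMakeTriangle (arr : List Int) : Bool :=
  let s := PySem.List.sorted arr (fun x => x) false
  (PySem.List.pyRange 0 (PySem.List.len s - 2) 1).any (fun i =>
    let a := PySem.List.pyGetD s i 0
    let b := PySem.List.pyGetD s (i + 1) 0
    let c := PySem.List.pyGetD s (i + 2) 0
    decide (a + b > c) && decide (a + c > b) && decide (b + c > a))

-- ===== PORT B =====
-- B: nested loops over all index triples i<j<k; early return True = any.
def possibleToMakeTriangle_alt (arr : List Int) : Bool :=
  let n := PySem.List.len arr
  (PySem.List.pyRange 0 n 1).any (fun i =>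
    (PySem.List.pyRange (i + 1) n 1).any (fun j =>
      (PySem.List.pyRange (j + 1) n 1).any (fun k =>
        let a := PySem.List.pyGetD arr i 0
        let b := PySem.List.pyGetD arr j 0
        let c := PySem.List.pyGetD arr k 0
        decide (a + b > c) && decide (a + c > b) && decide (b + c > a))))

-- ===== PRECONDITION & SPEC =====
def Spec_possibleToMakeTriangle (arr : List Int) (out : Bool) : Prop := out = possibleToMakeTriangle_alt arr
instance (arr : List Int) (out : Bool) : Decidable (Spec_possibleToMakeTriangle arr out) := by unfold Spec_possibleToMakeTriangle; infer_instance

-- ===== CLAIM (what is proved, stated in full; the proofs are below) =====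
def Claim_equal_possibleToMakeTriangle : Prop := ∀ (arr : List Int), Dom_possibleToMakeTriangle arr → Spec_possibleToMakeTriangle arr (possibleToMakeTriangle arr)

-- ===== LEMMAS AND PROOFS =====

-- the triangle condition on three sides
def TriP (a b c : Int) : Prop := a + b > c ∧ a + c > b ∧ b + c > a

-- some triple of distinct positions of l forms a triangle
def ExTriple (l : List Int) : Prop :=
  ∃ i j k : Nat, i < j ∧ j < k ∧ k < l.length ∧ TriP (l.getD i 0) (l.getD j 0) (l.getD k 0)

-- some consecutive triple of l forms a triangle
def ExCons (l : List Int) : Prop :=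
  ∃ i : Nat, i + 2 < l.length ∧ TriP (l.getD i 0) (l.getD (i + 1) 0) (l.getD (i + 2) 0)

-- TriP is invariant under permutation of its three arguments
theorem triP_of_perm {a b c x y z : Int} (h : ([a, b, c] : List Int).Perm [x, y, z])
    (ht : TriP x y z) : TriP a b c := by
  have hs := h.sum_eq
  simp at hs
  have hm0 := h.maximum_eq
  simp [List.maximum_cons] at hm0
  have hm : a ⊔ (b ⊔ c) = x ⊔ (y ⊔ z) := by exact_mod_cast hm0
  unfold TriP at *
  omega

-- three increasing positions of l yield a 3-element sublist
theorem triple_sublist (l : List Int) {i j k : Nat} (hij : i < j) (hjk : j < k)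
    (hk : k < l.length) :
    List.Sublist ([l[i]'(by omega), l[j]'(by omega), l[k]'hk] : List Int) l := by
  have h3 : List.Sublist ([l[k]'hk] : List Int) (l.drop k) := by
    rw [List.drop_eq_getElem_cons hk]
    exact List.cons_sublist_cons.mpr (List.nil_sublist _)
  have h2 : List.Sublist ([l[j]'(by omega), l[k]'hk] : List Int) (l.drop j) := by
    rw [List.drop_eq_getElem_cons (by omega : j < l.length)]
    exact List.cons_sublist_cons.mpr (h3.trans (List.drop_sublist_drop_left l (by omega)))
  have h1 : List.Sublist ([l[i]'(by omega), l[j]'(by omega), l[k]'hk] : List Int) (l.drop i) := by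
    rw [List.drop_eq_getElem_cons (by omega : i < l.length)]
    exact List.cons_sublist_cons.mpr (h2.trans (List.drop_sublist_drop_left l (by omega)))
  exact h1.trans (List.drop_sublist i l)

-- a 3-element sublist yields three increasing positions
theorem sublist_triple {x y z : Int} {l : List Int} (h : List.Sublist ([x, y, z] : List Int) l) :
    ∃ i j k : Nat, i < j ∧ j < k ∧ k < l.length ∧
      l.getD i 0 = x ∧ l.getD j 0 = y ∧ l.getD k 0 = z := by
  rw [List.sublist_iff_exists_fin_orderEmbedding_get_eq] at h
  obtain ⟨f, hf⟩ := h
  refine ⟨f ⟨0, by simp⟩, f ⟨1, by simp⟩, f ⟨2, by simp⟩, ?_, ?_, ?_, ?_, ?_, ?_⟩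
  · exact f.strictMono (by simp)
  · exact f.strictMono (by simp)
  · exact (f ⟨2, by simp⟩).isLt
  · rw [List.getD_eq_getElem l 0 (f ⟨0, by simp⟩).isLt]
    exact (hf ⟨0, by simp⟩).symm
  · rw [List.getD_eq_getElem l 0 (f ⟨1, by simp⟩).isLt]
    exact (hf ⟨1, by simp⟩).symm
  · rw [List.getD_eq_getElem l 0 (f ⟨2, by simp⟩).isLt]
    exact (hf ⟨2, by simp⟩).symm

-- ExTriple transfers along permutations
theorem exTriple_of_perm {l₁ l₂ : List Int} (h : l₁.Perm l₂) (he : ExTriple l₁) :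
    ExTriple l₂ := by
  obtain ⟨i, j, k, hij, hjk, hk, htri⟩ := he
  rw [List.getD_eq_getElem l₁ 0 (by omega), List.getD_eq_getElem l₁ 0 (by omega),
      List.getD_eq_getElem l₁ 0 hk] at htri
  have hsub : List.Subperm ([l₁[i]'(by omega), l₁[j]'(by omega), l₁[k]'hk] : List Int) l₂ :=
    (triple_sublist l₁ hij hjk hk).subperm.trans h.subperm
  obtain ⟨t, hperm, hsl⟩ := hsub
  have hlen : t.length = 3 := by simpa using hperm.length_eq
  match t, hlen with
  | [a, b, c], _ =>
    obtain ⟨p, q, r, hpq, hqr, hr, ha, hb, hc⟩ := sublist_triple hsl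
    exact ⟨p, q, r, hpq, hqr, hr, by rw [ha, hb, hc]; exact triP_of_perm hperm htri⟩

-- on a list with monotone entries, any valid triple forces a valid consecutive triple
theorem exCons_of_exTriple_mono (s : List Int)
    (hmono : ∀ p q : Nat, ∀ hpq : p ≤ q, ∀ hq : q < s.length, s[p]'(by omega) ≤ s[q])
    (he : ExTriple s) : ExCons s := by
  obtain ⟨p, q, r, hpq, hqr, hr, htri⟩ := he
  refine ⟨r - 2, by omega, ?_⟩
  rw [List.getD_eq_getElem s 0 (by omega), List.getD_eq_getElem s 0 (by omega),
      List.getD_eq_getElem s 0 (by omega)]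
  rw [List.getD_eq_getElem s 0 (by omega), List.getD_eq_getElem s 0 (by omega),
      List.getD_eq_getElem s 0 (by omega)] at htri
  have h1 : s[p]'(by omega) ≤ s[r - 2]'(by omega) := hmono p (r - 2) (by omega) (by omega)
  have h2 : s[q]'(by omega) ≤ s[r - 2 + 1]'(by omega) := hmono q (r - 2 + 1) (by omega) (by omega)
  have h3 : s[r - 2]'(by omega) ≤ s[r - 2 + 1]'(by omega) :=
    hmono (r - 2) (r - 2 + 1) (by omega) (by omega)
  have h4 : s[r - 2 + 1]'(by omega) ≤ s[r - 2 + 2]'(by omega) :=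
    hmono (r - 2 + 1) (r - 2 + 2) (by omega) (by omega)
  have h5 : s[r - 2 + 2]'(by omega) = s[r]'hr := by congr 1; omega
  unfold TriP at *
  omega

-- port B returns true exactly on ExTriple
theorem alt_iff (arr : List Int) : possibleToMakeTriangle_alt arr = true ↔ ExTriple arr := by
  simp only [possibleToMakeTriangle_alt, List.any_eq_true, PySem.List.mem_pyRange_one,
    PySem.List.len, Bool.and_eq_true, decide_eq_true_eq]
  constructor
  · rintro ⟨i, ⟨hi0, hin⟩, j, ⟨hj0, hjn⟩, k, ⟨hk0, hkn⟩, hc⟩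
    refine ⟨i.toNat, j.toNat, k.toNat, by omega, by omega, by omega, ?_⟩
    rw [PySem.List.pyGetD_eq_getElem arr 0 (by omega) (by exact_mod_cast hin),
        PySem.List.pyGetD_eq_getElem arr 0 (by omega) (by exact_mod_cast hjn),
        PySem.List.pyGetD_eq_getElem arr 0 (by omega) (by exact_mod_cast hkn)] at hc
    rw [List.getD_eq_getElem arr 0 (by omega), List.getD_eq_getElem arr 0 (by omega),
        List.getD_eq_getElem arr 0 (by omega)]
    simpa [TriP, and_assoc] using hc
  · rintro ⟨i, j, k, hij, hjk, hk, hc⟩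
    refine ⟨(i : Int), ⟨by omega, by omega⟩, (j : Int), ⟨by omega, by omega⟩,
      (k : Int), ⟨by omega, by omega⟩, ?_⟩
    rw [PySem.List.pyGetD_eq_getElem arr 0 (by omega) (by exact_mod_cast (by omega : i < arr.length)),
        PySem.List.pyGetD_eq_getElem arr 0 (by omega) (by exact_mod_cast (by omega : j < arr.length)),
        PySem.List.pyGetD_eq_getElem arr 0 (by omega) (by exact_mod_cast hk)]
    rw [List.getD_eq_getElem arr 0 (by omega), List.getD_eq_getElem arr 0 (by omega),
        List.getD_eq_getElem arr 0 hk] at hc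
    simpa [TriP, and_assoc] using hc

-- port A returns true exactly on ExCons of the sorted list
theorem a_iff (arr : List Int) : possibleToMakeTriangle arr = true ↔
    ExCons (PySem.List.sorted arr (fun x => x) false) := by
  set s := PySem.List.sorted arr (fun x => x) false with hs
  simp only [possibleToMakeTriangle, List.any_eq_true, PySem.List.mem_pyRange_one,
    PySem.List.len, Bool.and_eq_true, decide_eq_true_eq, ← hs]
  constructor
  · rintro ⟨i, ⟨hi0, hin⟩, hc⟩
    refine ⟨i.toNat, by omega, ?_⟩
    rw [PySem.List.pyGetD_eq_getElem s 0 (by omega) (by omega),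
        PySem.List.pyGetD_eq_getElem s 0 (by omega) (by omega),
        PySem.List.pyGetD_eq_getElem s 0 (by omega) (by omega)] at hc
    have e1 : (i + 1).toNat = i.toNat + 1 := by omega
    have e2 : (i + 2).toNat = i.toNat + 2 := by omega
    rw [List.getD_eq_getElem s 0 (by omega), List.getD_eq_getElem s 0 (by omega),
        List.getD_eq_getElem s 0 (by omega)]
    simp only [e1, e2] at hc
    simpa [TriP, and_assoc] using hc
  · rintro ⟨i, hlt, hc⟩
    refine ⟨(i : Int), ⟨by omega, by omega⟩, ?_⟩
    rw [PySem.List.pyGetD_eq_getElem s 0 (by omega) (by omega),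
        PySem.List.pyGetD_eq_getElem s 0 (by omega) (by omega),
        PySem.List.pyGetD_eq_getElem s 0 (by omega) (by omega)]
    have e1 : ((i : Int) + 1).toNat = ((i : Int)).toNat + 1 := by omega
    have e2 : ((i : Int) + 2).toNat = ((i : Int)).toNat + 2 := by omega
    rw [List.getD_eq_getElem s 0 (by omega), List.getD_eq_getElem s 0 (by omega),
        List.getD_eq_getElem s 0 (by omega)] at hc
    simp only [e1, e2, Int.toNat_natCast]
    simpa [TriP, and_assoc] using hc

-- ===== VERDICT (by name: the statement is the Claim_ definition above) =====
theorem possibleToMakeTriangle_spec : Claim_equal_possibleToMakeTriangle := by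
  intro arr _
  unfold Spec_possibleToMakeTriangle
  have hperm := PySem.List.sorted_perm arr (fun x => x) false
  by_cases h : ExTriple arr
  · have hA : possibleToMakeTriangle arr = true := by
      rw [a_iff]
      exact exCons_of_exTriple_mono _
        (fun p q hpq hq => PySem.List.sorted_id_getElem_mono arr hpq hq)
        (exTriple_of_perm hperm.symm h)
    have hB : possibleToMakeTriangle_alt arr = true := (alt_iff arr).mpr h
    rw [hA, hB]
  · have hA : possibleToMakeTriangle arr = false := by
      rw [Bool.eq_false_iff, Ne, a_iff]
      intro hc
      obtain ⟨i, hlt, htri⟩ := hc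
      exact h (exTriple_of_perm hperm ⟨i, i + 1, i + 2, by omega, by omega, by omega, htri⟩)
    have hB : possibleToMakeTriangle_alt arr = false := by
      rw [Bool.eq_false_iff, Ne, alt_iff]
      exact h
    rw [hA, hB]
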